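-- pv_equiv track=rewrite | github.com/Chronos-llc/chronos-AI-agent-builder-studio | backend/app/core/workflow_generation_engine.py | _optimize_step_ordering
-- ===== SOURCE A (Python) =====
-- from typing import Dict, Any, Optional, List
--
-- def _optimize_step_ordering(steps: List[Dict[str, Any]]) -> List[Dict[str, Any]]:
--     """Optimize step ordering based on dependencies."""
--     if not steps:
--         return steps
--
--     # Simple reordering: put independent steps first
--     steps_with_deps = {i: step for i, step in enumerate(steps)}
--     dependency_graph = {}
--
--     for i, step in enumerate(steps):
--         deps = step.get("depends_on", [])
--         dependency_graph[i] = deps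
--
--     # Sort by dependency count (fewer dependencies first)
--     sorted_indices = sorted(
--         range(len(steps)),
--         key=lambda i: len(dependency_graph.get(i, []))
--     )
--
--     return [steps[i] for i in sorted_indices]
-- ===== SOURCE B (Python) =====
-- from typing import Dict, Any, List
--
-- def _optimize_step_ordering(steps: List[Dict[str, Any]]) -> List[Dict[str, Any]]:
--     """Optimize step ordering based on dependencies (bucket sort by dependency count)."""
--     if not steps:
--         return steps
--     buckets = {}
--     for step in steps:
--         count = len(step.get("depends_on", []))
--         buckets.setdefault(count, []).append(step)
--     return [step for count in sorted(buckets) for step in buckets[count]]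
-- ===== Notes on version B (the rewrite author's own statement) =====
-- stated objective: alternative
-- what changed: Replaces the index-dict plus comparison sort over range(len(steps)) with a one-pass bucketing of the steps themselves by dependency count, concatenating buckets in ascending count order (a stable counting/bucket sort).
import Mathlib
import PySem

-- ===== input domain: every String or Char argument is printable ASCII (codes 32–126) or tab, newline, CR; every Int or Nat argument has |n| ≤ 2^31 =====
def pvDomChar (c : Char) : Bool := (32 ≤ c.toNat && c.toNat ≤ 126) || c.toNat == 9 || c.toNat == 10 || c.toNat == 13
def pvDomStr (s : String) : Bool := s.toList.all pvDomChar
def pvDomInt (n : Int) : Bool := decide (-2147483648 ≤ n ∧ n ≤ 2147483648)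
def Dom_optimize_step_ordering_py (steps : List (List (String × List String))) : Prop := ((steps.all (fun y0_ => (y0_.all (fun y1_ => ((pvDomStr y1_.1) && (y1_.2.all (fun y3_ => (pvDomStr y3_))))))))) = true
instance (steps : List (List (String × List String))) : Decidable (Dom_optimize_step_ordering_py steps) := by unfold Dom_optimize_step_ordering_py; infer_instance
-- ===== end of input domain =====

-- B reorders by bucketing the steps by dependency count and concatenating the buckets in
-- ascending count order (a stable bucket sort), instead of A's comparison sort over indices.

-- step.get("depends_on", []) : first-match lookup in the step's association list (shared helper)
def pvDepsOf (step : List (String × List String)) : List String :=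
  PySem.Dict.getD ⟨step⟩ "depends_on" []

-- ===== PORT A =====
def optimize_step_ordering_py (steps : List (List (String × List String))) : List (List (String × List String)) :=
  if steps = [] then steps
  else
    let _steps_with_deps : PySem.Dict Int (List (String × List String)) :=
      (PySem.List.enumerate steps).foldl (fun d p => d.insert p.1 p.2) PySem.Dict.empty
    let dependency_graph : PySem.Dict Int (List String) :=
      (PySem.List.enumerate steps).foldl (fun d p => d.insert p.1 (pvDepsOf p.2)) PySem.Dict.empty
    let sorted_indices :=
      PySem.List.sorted (PySem.List.pyRange 0 (PySem.List.len steps))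
        (fun i => PySem.List.len (dependency_graph.getD i []))
    sorted_indices.map (fun i => PySem.List.pyGetD steps i [])

-- ===== PORT B =====
def optimize_step_ordering_py_alt (steps : List (List (String × List String))) : List (List (String × List String)) :=
  if steps = [] then steps
  else
    let buckets : PySem.Dict Int (List (List (String × List String))) :=
      steps.foldl (fun d step => d.modify (PySem.List.len (pvDepsOf step)) [] (fun l => l ++ [step]))
        PySem.Dict.empty
    (PySem.List.sorted buckets.keys (fun c => c)).flatMap (fun c => buckets.getD c [])

-- ===== PRECONDITION & SPEC =====
def Spec_optimize_step_ordering_py (steps : List (List (String × List String))) (out : List (List (String × List String))) : Prop := out = optimize_step_ordering_py_alt steps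
instance (steps : List (List (String × List String))) (out : List (List (String × List String))) : Decidable (Spec_optimize_step_ordering_py steps out) := by unfold Spec_optimize_step_ordering_py; infer_instance

-- ===== CLAIM (what is proved, stated in full; the proofs are below) =====
def Claim_equal_optimize_step_ordering_py : Prop := ∀ (steps : List (List (String × List String))), Dom_optimize_step_ordering_py steps → Spec_optimize_step_ordering_py steps (optimize_step_ordering_py steps)

-- ===== LEMMAS AND PROOFS =====

-- the common sort key: a step's dependency count
def pvKey (s : List (String × List String)) : Int := PySem.List.len (pvDepsOf s)

-- the bucket dict port B builds
def pvBuild (xs : List (List (String × List String))) : PySem.Dict Int (List (List (String × List String))) :=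
  xs.foldl (fun d step => d.modify (PySem.List.len (pvDepsOf step)) [] (fun l => l ++ [step]))
    PySem.Dict.empty

theorem pv_insertBy_congr_keys {α : Type} (k1 k2 : α → Int) (x : α) (ys : List α)
    (hx : k1 x = k2 x) (hys : ∀ y ∈ ys, k1 y = k2 y) :
    PySem.List.insertBy (fun a b => decide (k1 a < k1 b)) x ys
      = PySem.List.insertBy (fun a b => decide (k2 a < k2 b)) x ys := by
  induction ys with
  | nil => simp [PySem.List.insertBy]
  | cons y ys ih =>
    have hy : k1 y = k2 y := hys y (by simp)
    simp only [PySem.List.insertBy, hx, hy]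
    rw [ih (fun y hy => hys y (by simp [hy]))]

theorem pv_sorted_congr_keys {α : Type} (k1 k2 : α → Int) (l : List α)
    (h : ∀ y ∈ l, k1 y = k2 y) :
    PySem.List.sorted l k1 = PySem.List.sorted l k2 := by
  rw [PySem.List.sorted_eq_foldl_insertBy, PySem.List.sorted_eq_foldl_insertBy]
  suffices H : ∀ (l acc : List α), (∀ y ∈ acc, k1 y = k2 y) → (∀ y ∈ l, k1 y = k2 y) →
      List.foldl (fun acc x => PySem.List.insertBy (fun a b => decide (k1 a < k1 b)) x acc) acc l
        = List.foldl (fun acc x => PySem.List.insertBy (fun a b => decide (k2 a < k2 b)) x acc) acc l by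
    exact H l [] (by simp) h
  intro l
  induction l with
  | nil => intro acc _ _; rfl
  | cons x l ih =>
    intro acc hacc hl
    simp only [List.foldl_cons]
    rw [pv_insertBy_congr_keys k1 k2 x acc (hl x (by simp)) hacc]
    exact ih _ (fun y hy => by
        rcases (PySem.List.mem_insertBy _ _ _ _).1 hy with h | h
        · exact h ▸ hl x (by simp)
        · exact hacc y h)
      (fun y hy => hl y (by simp [hy]))

theorem pv_insertBy_map {α β : Type} (key : β → Int) (f : α → β) (x : α) (ys : List α) :
    List.map f (PySem.List.insertBy (fun a b => decide (key (f a) < key (f b))) x ys)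
      = PySem.List.insertBy (fun a b => decide (key a < key b)) (f x) (ys.map f) := by
  induction ys with
  | nil => simp [PySem.List.insertBy]
  | cons y ys ih =>
    simp only [PySem.List.insertBy, List.map_cons]
    by_cases h : key (f x) < key (f y) <;> simp [h, ih]

theorem pv_sorted_map {α β : Type} (key : β → Int) (f : α → β) (l : List α) :
    PySem.List.sorted (l.map f) key = (PySem.List.sorted l (fun i => key (f i))).map f := by
  rw [PySem.List.sorted_eq_foldl_insertBy, PySem.List.sorted_eq_foldl_insertBy]
  suffices H : ∀ (l : List α) (acc : List α),
      List.foldl (fun acc x => PySem.List.insertBy (fun a b => decide (key a < key b)) x acc) (acc.map f) (l.map f)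
        = (List.foldl (fun acc x => PySem.List.insertBy (fun a b => decide (key (f a) < key (f b))) x acc) acc l).map f by
    exact H l []
  intro l
  induction l with
  | nil => intro acc; rfl
  | cons x l ih =>
    intro acc
    simp only [List.map_cons, List.foldl_cons]
    rw [← pv_insertBy_map key f x acc, ih]

theorem pv_insertBy_append_not {α : Type} (p : α → α → Bool) (x : α) (fs ss : List α)
    (h : ∀ y ∈ fs, p x y = false) :
    PySem.List.insertBy p x (fs ++ ss) = fs ++ PySem.List.insertBy p x ss := by
  induction fs with
  | nil => simp
  | cons y fs ih =>
    have hy : p x y = false := h y (by simp)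
    simp only [List.cons_append, PySem.List.insertBy, hy]
    simp [ih (fun y hy => h y (by simp [hy]))]

theorem pv_insertBy_head_true {α : Type} (p : α → α → Bool) (x : α) (ss : List α)
    (h : ∀ y ∈ ss, p x y = true) :
    PySem.List.insertBy p x ss = x :: ss := by
  cases ss with
  | nil => rfl
  | cons y t => simp [PySem.List.insertBy, h y (by simp)]

theorem pv_sorted_append_singleton {α : Type} (key : α → Int) (xs : List α) (x : α) :
    PySem.List.sorted (xs ++ [x]) key
      = PySem.List.insertBy (fun a b => decide (key a < key b)) x (PySem.List.sorted xs key) := by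
  rw [PySem.List.sorted_eq_foldl_insertBy, PySem.List.sorted_eq_foldl_insertBy, List.foldl_append]
  rfl

-- when v is a lower bound of the keys, the stable sort puts the key-v elements first, in order
theorem pv_sorted_extract {α : Type} (key : α → Int) (v : Int) (xs : List α)
    (h : ∀ x ∈ xs, v ≤ key x) :
    PySem.List.sorted xs key
      = xs.filter (fun s => key s == v)
        ++ PySem.List.sorted (xs.filter (fun s => !(key s == v))) key := by
  induction xs using List.reverseRecOn with
  | nil => rfl
  | append_singleton xs x ih =>
    rw [pv_sorted_append_singleton, ih (fun y hy => h y (by simp [hy]))]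
    by_cases hx : key x = v
    · rw [pv_insertBy_append_not _ _ _ _ (fun y hy => by
        have : key y = v := by simpa using (List.mem_filter.1 hy).2
        simp [this, hx])]
      rw [pv_insertBy_head_true _ _ _ (fun y hy => by
        have hy' := (PySem.List.mem_sorted _ _ _ _).1 hy
        have h1 : ¬ (key y = v) := by simpa using (List.mem_filter.1 hy').2
        have h2 : v ≤ key y := h y (by simp [(List.mem_filter.1 hy').1])
        simp; omega)]
      simp [List.filter_append, hx]
    · have hvx : v < key x := by
        have := h x (by simp); omega
      rw [pv_insertBy_append_not _ _ _ _ (fun y hy => by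
        have : key y = v := by simpa using (List.mem_filter.1 hy).2
        simp [this]; omega)]
      rw [← pv_sorted_append_singleton]
      simp [List.filter_append, hx]

-- the stable sort is the concatenation of the key-buckets taken in ascending key order
theorem pv_sorted_flatMap {α : Type} (key : α → Int) (K : List Int) (xs : List α)
    (hK : K.Pairwise (· < ·)) (hmem : ∀ x ∈ xs, key x ∈ K) :
    PySem.List.sorted xs key = K.flatMap (fun c => xs.filter (fun s => key s == c)) := by
  induction K generalizing xs with
  | nil =>
    cases xs with
    | nil => rfl
    | cons x t => exact absurd (hmem x (by simp)) (by simp)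
  | cons v K' ih =>
    have hlt : ∀ w ∈ K', v < w := by
      intro w hw; exact (List.pairwise_cons.1 hK).1 w hw
    have hle : ∀ x ∈ xs, v ≤ key x := by
      intro x hx
      rcases List.mem_cons.1 (hmem x hx) with h | h
      · omega
      · exact le_of_lt (hlt _ h)
    rw [pv_sorted_extract key v xs hle]
    rw [ih (xs.filter (fun s => !(key s == v))) (List.pairwise_cons.1 hK).2 (fun x hx => by
      have h1 : ¬ (key x = v) := by simpa using (List.mem_filter.1 hx).2
      rcases List.mem_cons.1 (hmem x (List.mem_filter.1 hx).1) with h | h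
      · omega
      · exact h)]
    rw [List.flatMap_cons]
    congr 1
    have : ∀ c ∈ K', ((xs.filter (fun s => !(key s == v))).filter (fun s => key s == c))
        = xs.filter (fun s => key s == c) := by
      intro c hc
      rw [List.filter_filter]
      apply List.filter_congr
      intro x _
      by_cases h : key x = c
      · have hcv : ¬ c = v := by have := hlt c hc; omega
        simp [h, hcv]
      · simp [h]
    exact List.flatMap_congr this

theorem pv_keys_insert {κ ν : Type} [BEq κ] [LawfulBEq κ] (d : PySem.Dict κ ν) (k : κ) (v : ν) :
    (d.insert k v).keys = if d.contains k then d.keys else d.keys ++ [k] := by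
  by_cases h : d.contains k
  · simp only [PySem.Dict.insert, h, if_pos, PySem.Dict.keys, List.map_map]
    rw [List.map_congr_left]
    intro p _
    by_cases hp : p.1 == k
    · simp [hp]; exact (LawfulBEq.eq_of_beq hp).symm
    · simp [hp]
  · simp [PySem.Dict.insert, h, PySem.Dict.keys]

-- B's bucket dict: its keys are the distinct counts in first-occurrence order
-- and each bucket is the in-order sublist of steps with that count
theorem pv_build_spec (xs : List (List (String × List String))) :
    (pvBuild xs).keys = PySem.Set.ofList (xs.map pvKey)
      ∧ ∀ c : Int, (pvBuild xs).getD c [] = xs.filter (fun s => pvKey s == c) := by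
  induction xs using List.reverseRecOn with
  | nil => exact ⟨rfl, fun c => rfl⟩
  | append_singleton xs x ih =>
    have hstep : pvBuild (xs ++ [x])
        = (pvBuild xs).insert (pvKey x) ((pvBuild xs).getD (pvKey x) [] ++ [x]) := by
      simp [pvBuild, List.foldl_append, PySem.Dict.modify, pvKey]
    have hcontains : (pvBuild xs).contains (pvKey x)
        = PySem.Set.contains (PySem.Set.ofList (xs.map pvKey)) (pvKey x) := by
      rw [Bool.eq_iff_iff, PySem.Dict.contains_iff_mem_keys, ih.1]
      simp [PySem.Set.contains]
    constructor
    · rw [hstep, pv_keys_insert, ih.1, List.map_append, hcontains]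
      simp only [PySem.Set.ofList, List.foldl_append]
      rfl
    · intro c
      rw [hstep, PySem.Dict.getD_insert, ih.2 c, List.filter_append]
      by_cases h : c = pvKey x
      · simp [h, ih.2, pvKey]
      · have : ¬ (pvKey x == c) := by simp [pvKey] at h ⊢; omega
        simp [h, this]

-- A's dependency_graph dict: looking up an in-range index yields that step's depends_on list
theorem pv_enum_build_getD (xs : List (List (String × List String))) (s : Int)
    (d : PySem.Dict Int (List String)) (j : Int) :
    (((PySem.List.enumerate xs s).foldl (fun d p => d.insert p.1 (pvDepsOf p.2)) d).getD j [])
      = if s ≤ j ∧ j < s + xs.length then pvDepsOf (PySem.List.pyGetD xs (j - s) [])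
        else d.getD j [] := by
  induction xs generalizing s d with
  | nil => simp [PySem.List.enumerate]
  | cons x t ih =>
    rw [show PySem.List.enumerate (x :: t) s = (s, x) :: PySem.List.enumerate t (s + 1) from rfl]
    rw [List.foldl_cons, ih]
    by_cases hj : s ≤ j ∧ j < s + (x :: t).length
    · rcases hj with ⟨h1, h2⟩
      rw [List.length_cons] at h2
      by_cases hjs : j = s
      · subst hjs
        rw [if_neg (by omega), if_pos (by simp only [List.length_cons]; push_cast; omega)]
        rw [PySem.Dict.getD_insert, if_pos rfl]
        simp [PySem.List.pyGetD_zero_cons]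
      · rw [if_pos (by push_cast at h2 ⊢; omega),
          if_pos (by simp only [List.length_cons]; push_cast at h2 ⊢; omega)]
        have e2 : j - s = (((j - (s+1)).toNat + 1 : Nat) : Int) := by push_cast; omega
        have e1 : j - (s+1) = (((j - (s+1)).toNat : Nat) : Int) := by omega
        rw [e1, e2, PySem.List.pyGetD_natCast, PySem.List.pyGetD_natCast, List.getD_cons_succ]
    · rw [List.length_cons] at hj; push_cast at hj
      rw [if_neg (by omega), if_neg (by simp only [List.length_cons]; push_cast; omega),
        PySem.Dict.getD_insert, if_neg (by omega)]

theorem pv_portA_eq_sorted (steps : List (List (String × List String))) :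
    optimize_step_ordering_py steps = PySem.List.sorted steps pvKey := by
  by_cases h : steps = []
  · subst h; rfl
  · unfold optimize_step_ordering_py
    rw [if_neg h]
    show (PySem.List.sorted (PySem.List.pyRange 0 (PySem.List.len steps))
        (fun i => PySem.List.len (((PySem.List.enumerate steps).foldl
          (fun d p => d.insert p.1 (pvDepsOf p.2)) PySem.Dict.empty).getD i []))).map
        (fun i => PySem.List.pyGetD steps i []) = PySem.List.sorted steps pvKey
    rw [pv_sorted_congr_keys _ (fun i => pvKey (PySem.List.pyGetD steps i []))
      (PySem.List.pyRange 0 (PySem.List.len steps)) (fun i hi => by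
        have hb := PySem.List.mem_pyRange_one.1 hi
        rw [pv_enum_build_getD steps 0 PySem.Dict.empty i, if_pos (by
          simp only [PySem.List.len_eq] at hb; omega)]
        simp [pvKey])]
    rw [← pv_sorted_map pvKey (fun i => PySem.List.pyGetD steps i []),
      PySem.List.map_pyGetD_pyRange_zero]

theorem pv_portB_eq_sorted (steps : List (List (String × List String))) :
    optimize_step_ordering_py_alt steps = PySem.List.sorted steps pvKey := by
  by_cases h : steps = []
  · subst h; rfl
  · unfold optimize_step_ordering_py_alt
    rw [if_neg h]
    show (PySem.List.sorted (pvBuild steps).keys (fun c => c)).flatMap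
      (fun c => (pvBuild steps).getD c []) = PySem.List.sorted steps pvKey
    rw [(pv_build_spec steps).1]
    rw [List.flatMap_congr (fun c _ => (pv_build_spec steps).2 c)]
    exact (pv_sorted_flatMap pvKey _ steps
      (PySem.List.sorted_ofList_pairwise_lt _)
      (fun x hx => by
        rw [PySem.List.mem_sorted, PySem.Set.mem_ofList]
        exact List.mem_map_of_mem hx)).symm

-- ===== VERDICT (by name: the statement is the Claim_ definition above) =====
theorem optimize_step_ordering_py_spec : Claim_equal_optimize_step_ordering_py := by
  intro steps _
  unfold Spec_optimize_step_ordering_py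
  rw [pv_portA_eq_sorted, pv_portB_eq_sorted]
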